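-- pv_equiv track=rewrite | github.com/rakki194/reynard | experimental/phoenix/src/core/domain_expertise_analyzer.py | _determine_expertise_level
-- ===== SOURCE A (Python) =====
-- from typing import Any, Dict, List, Optional, Tuple
--
-- def _determine_expertise_level(text: str, patterns: Dict[str, Any]) -> str:
--     """Determine expertise level based on language complexity and depth."""
--     expertise_levels = patterns["expertise_levels"]
--
--     level_scores = {}
--     for level, indicators in expertise_levels.items():
--         score = sum(
--             1 for indicator in indicators if indicator.lower() in text.lower()
--         )
--         level_scores[level] = score
--
--     # Determine level based on highest score
--     if level_scores["expert"] > 0: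
--         return "expert"
--     elif level_scores["intermediate"] > 0:
--         return "intermediate"
--     elif level_scores["beginner"] > 0:
--         return "beginner"
--     else:
--         return "unknown"
-- ===== SOURCE B (Python) =====
-- def _determine_expertise_level(text: str, patterns) -> str:
--     """Determine expertise level based on language complexity and depth."""
--     levels = patterns["expertise_levels"]
--     t = text.lower()
--     for level in ("expert", "intermediate", "beginner"):
--         if any(indicator.lower() in t for indicator in levels[level]):
--             return level
--     return "unknown"
-- ===== Notes on version B (the rewrite author's own statement) =====
-- stated objective: simpler
-- what changed: Drops the level_scores counting table: B checks the three levels in priority order and short-circuits on the first indicator set with any match, instead of counting matches for every level first and then reading the table.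
import Mathlib
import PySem

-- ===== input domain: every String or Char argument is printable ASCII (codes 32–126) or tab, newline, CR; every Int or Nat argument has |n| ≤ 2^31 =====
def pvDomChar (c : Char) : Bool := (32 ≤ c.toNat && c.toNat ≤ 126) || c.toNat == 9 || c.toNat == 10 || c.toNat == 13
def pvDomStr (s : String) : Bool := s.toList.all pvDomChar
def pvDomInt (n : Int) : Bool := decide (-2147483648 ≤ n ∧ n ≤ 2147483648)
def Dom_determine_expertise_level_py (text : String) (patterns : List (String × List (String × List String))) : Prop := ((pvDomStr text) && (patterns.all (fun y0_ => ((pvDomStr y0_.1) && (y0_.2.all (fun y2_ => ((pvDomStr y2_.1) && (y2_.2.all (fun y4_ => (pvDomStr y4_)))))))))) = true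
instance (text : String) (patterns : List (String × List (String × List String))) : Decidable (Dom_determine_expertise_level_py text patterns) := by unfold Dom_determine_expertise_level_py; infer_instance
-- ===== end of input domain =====

-- B replaces A's full counting table over every level by a priority-ordered short-circuit
-- scan of the three level indicator sets ('simpler'; same return value everywhere in Pre_).

-- ===== PORT A =====
-- score = sum(1 for indicator in indicators if indicator.lower() in text.lower())
def pvScoreA (text : String) (indicators : List String) : Int :=
  ((indicators.countP
      (fun indicator => PySem.Str.isIn (PySem.Str.lower indicator) (PySem.Str.lower text)) : Nat) : Int)

def determine_expertise_level_py (text : String) (patterns : List (String × List (String × List String))) : String :=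
  match (PySem.Dict.mk patterns).get? "expertise_levels" with
  | none => ""  -- Python: KeyError; excluded by Pre_
  | some expertise_levels =>
    -- for level, indicators in expertise_levels.items(): level_scores[level] = score
    let level_scores : PySem.Dict String Int :=
      expertise_levels.foldl (fun d p => d.insert p.1 (pvScoreA text p.2)) PySem.Dict.empty
    match level_scores.get? "expert" with
    | none => ""  -- KeyError; excluded by Pre_
    | some se =>
      if se > 0 then "expert"
      else
        match level_scores.get? "intermediate" with
        | none => ""  -- KeyError; excluded by Pre_
        | some si =>
          if si > 0 then "intermediate"
          else
            match level_scores.get? "beginner" with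
            | none => ""  -- KeyError; excluded by Pre_
            | some sb => if sb > 0 then "beginner" else "unknown"

-- ===== PORT B =====
def pvAnyMatch (t : String) (indicators : List String) : Bool :=
  indicators.any (fun indicator => PySem.Str.isIn (PySem.Str.lower indicator) t)

def pvGoB (t : String) (levels : PySem.Dict String (List String)) : List String → String
  | [] => "unknown"
  | lvl :: rest =>
    match levels.get? lvl with
    | none => ""  -- Python: KeyError; excluded by Pre_
    | some inds => if pvAnyMatch t inds then lvl else pvGoB t levels rest

def determine_expertise_level_py_alt (text : String) (patterns : List (String × List (String × List String))) : String :=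
  match (PySem.Dict.mk patterns).get? "expertise_levels" with
  | none => ""  -- Python: KeyError; excluded by Pre_
  | some levels =>
    pvGoB (PySem.Str.lower text) (PySem.Dict.mk levels) ["expert", "intermediate", "beginner"]

-- ===== PRECONDITION & SPEC =====
-- Pre_ excludes exactly the inputs on which A raises KeyError — the pattern dict lacks
-- 'expertise_levels' or lacks a level key on a lookup path that is actually reached
-- ('expert' always; 'intermediate' only when no expert indicator matches; 'beginner' only
-- when neither matches) — plus association lists with duplicate keys, which denote no
-- Python dict (Python keeps the last duplicate, the assoc-list model the first).
def Pre_determine_expertise_level_py (text : String) (patterns : List (String × List (String × List String))) : Prop :=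
  (patterns.map Prod.fst).Nodup ∧
  (PySem.Dict.mk patterns).contains "expertise_levels" = true ∧
  ((((PySem.Dict.mk patterns).getD "expertise_levels" []).map Prod.fst).Nodup ∧
   "expert" ∈ (((PySem.Dict.mk patterns).getD "expertise_levels" []).map Prod.fst) ∧
   (pvAnyMatch (PySem.Str.lower text) ((PySem.Dict.mk ((PySem.Dict.mk patterns).getD "expertise_levels" [])).getD "expert" []) = true ∨
    ("intermediate" ∈ (((PySem.Dict.mk patterns).getD "expertise_levels" []).map Prod.fst) ∧
     (pvAnyMatch (PySem.Str.lower text) ((PySem.Dict.mk ((PySem.Dict.mk patterns).getD "expertise_levels" [])).getD "intermediate" []) = true ∨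
      "beginner" ∈ (((PySem.Dict.mk patterns).getD "expertise_levels" []).map Prod.fst)))))

instance (text : String) (patterns : List (String × List (String × List String))) : Decidable (Pre_determine_expertise_level_py text patterns) := by
  unfold Pre_determine_expertise_level_py; infer_instance

def pvWitness_determine_expertise_level_py : String × (List (String × List (String × List String))) :=
  ("hello world", [("expertise_levels",
     [("expert", ["architecture"]), ("intermediate", ["refactor"]), ("beginner", ["hello"])])])

def Spec_determine_expertise_level_py (text : String) (patterns : List (String × List (String × List String))) (out : String) : Prop := out = determine_expertise_level_py_alt text patterns
instance (text : String) (patterns : List (String × List (String × List String))) (out : String) : Decidable (Spec_determine_expertise_level_py text patterns out) := by unfold Spec_determine_expertise_level_py; infer_instance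

-- ===== CLAIM (what is proved, stated in full; the proofs are below) =====
def Claim_equal_determine_expertise_level_py : Prop := ∀ (text : String) (patterns : List (String × List (String × List String))), Dom_determine_expertise_level_py text patterns → Pre_determine_expertise_level_py text patterns → Spec_determine_expertise_level_py text patterns (determine_expertise_level_py text patterns)

-- ===== LEMMAS AND PROOFS =====

-- A's score table looked up at a key present in the inner dict yields that key's value's score.
theorem scores_get? {V : Type} (els : List (String × List String)) (k : String)
    (hnd : (els.map Prod.fst).Nodup) (inds : List String)
    (h : (PySem.Dict.mk els).get? k = some inds) (f : List String → V) :
    (els.foldl (fun d p => d.insert p.1 (f p.2)) PySem.Dict.empty).get? k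
      = some (f inds) := by
  have hfresh : ∀ a ∈ els, (PySem.Dict.empty : PySem.Dict String V).contains a.1 = false := by
    intro a _; simp [PySem.Dict.contains_empty]
  have hitems := PySem.Dict.items_foldl_insert_fresh (l := els) (d := PySem.Dict.empty)
      (k := Prod.fst) (v := fun p => f p.2) hfresh hnd
  have hmem : (k, inds) ∈ els := PySem.Dict.mem_items_of_get?_eq_some (d := PySem.Dict.mk els) h
  have hmem2 : (k, f inds) ∈ (els.foldl (fun d p => d.insert p.1 (f p.2)) PySem.Dict.empty).items := by
    rw [hitems]; simp; exact Or.inr ⟨inds, hmem, rfl⟩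
  have hkeys : (els.foldl (fun d p => d.insert p.1 (f p.2)) PySem.Dict.empty).keys.Nodup :=
    PySem.Dict.nodup_keys_foldl_insert_key els Prod.fst (fun d p => f p.2) PySem.Dict.empty
      (by simp [PySem.Dict.keys_empty])
  exact PySem.Dict.get?_of_mem_items _ hmem2 hkeys

-- a level's count is positive iff some indicator matches
theorem score_pos_iff (text : String) (inds : List String) :
    (0 < pvScoreA text inds) ↔ pvAnyMatch (PySem.Str.lower text) inds = true := by
  simp [pvScoreA, pvAnyMatch, List.countP_pos_iff, List.any_eq_true]

-- a key listed in the inner dict's keys has a value there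
theorem get?_of_mem_fst (els : List (String × List String)) (k : String)
    (h : k ∈ els.map Prod.fst) : ∃ inds, (PySem.Dict.mk els).get? k = some inds := by
  cases hE : (PySem.Dict.mk els).get? k with
  | some v => exact ⟨v, rfl⟩
  | none => exact absurd h ((PySem.Dict.get?_eq_none_iff_not_mem_keys _ _).mp hE)

theorem determine_expertise_level_py_spec : Claim_equal_determine_expertise_level_py := by
  intro text patterns _ hpre
  obtain ⟨_, hc, hnd2, he, hrest⟩ := hpre
  unfold Spec_determine_expertise_level_py
  unfold determine_expertise_level_py determine_expertise_level_py_alt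
  cases hm : (PySem.Dict.mk patterns).get? "expertise_levels" with
  | none =>
      exact absurd hc (by rw [PySem.Dict.contains_eq_isSome_get?, hm]; simp)
  | some els =>
      have hels : (PySem.Dict.mk patterns).getD "expertise_levels" [] = els :=
        PySem.Dict.getD_of_get?_eq_some _ [] hm
      rw [hels] at hnd2 he hrest
      obtain ⟨ie, hie⟩ := get?_of_mem_fst els _ he
      have hgde : (PySem.Dict.mk els).getD "expert" [] = ie :=
        PySem.Dict.getD_of_get?_eq_some _ [] hie
      rw [hgde] at hrest
      by_cases h1 : pvAnyMatch (PySem.Str.lower text) ie = true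
      · simp [scores_get? els _ hnd2 _ hie, pvGoB, hie, h1, (score_pos_iff text ie).mpr h1]
      · have n1 : ¬ 0 < pvScoreA text ie := fun hp => h1 ((score_pos_iff text ie).mp hp)
        obtain ⟨hi, hrest2⟩ := hrest.resolve_left h1
        obtain ⟨ii, hii⟩ := get?_of_mem_fst els _ hi
        have hgdi : (PySem.Dict.mk els).getD "intermediate" [] = ii :=
          PySem.Dict.getD_of_get?_eq_some _ [] hii
        rw [hgdi] at hrest2
        by_cases h2 : pvAnyMatch (PySem.Str.lower text) ii = true
        · simp [scores_get? els _ hnd2 _ hie, scores_get? els _ hnd2 _ hii, pvGoB,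
            hie, hii, h1, h2, n1, (score_pos_iff text ii).mpr h2]
        · have n2 : ¬ 0 < pvScoreA text ii := fun hp => h2 ((score_pos_iff text ii).mp hp)
          have hb : "beginner" ∈ els.map Prod.fst := hrest2.resolve_left h2
          obtain ⟨ib, hib⟩ := get?_of_mem_fst els _ hb
          by_cases h3 : pvAnyMatch (PySem.Str.lower text) ib = true
          · simp [scores_get? els _ hnd2 _ hie, scores_get? els _ hnd2 _ hii,
              scores_get? els _ hnd2 _ hib, pvGoB, hie, hii, hib, h1, h2, h3, n1, n2,
              (score_pos_iff text ib).mpr h3]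
          · have n3 : ¬ 0 < pvScoreA text ib := fun hp => h3 ((score_pos_iff text ib).mp hp)
            simp [scores_get? els _ hnd2 _ hie, scores_get? els _ hnd2 _ hii,
              scores_get? els _ hnd2 _ hib, pvGoB, hie, hii, hib, h1, h2, h3, n1, n2, n3]
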